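-- pv_equiv track=rewrite | github.com/MODSetter/SurfSense | surfsense_backend/app/tasks/connector_indexers/base.py | build_document_metadata_string
-- ===== SOURCE A (Python) =====
-- def build_document_metadata_string(
--     metadata_sections: list[tuple[str, list[str]]],
-- ) -> str:
--     """
--     Build a document string from metadata sections.
--
--     Args:
--         metadata_sections: List of (section_title, section_content) tuples
--
--     Returns:
--         Combined document string
--     """
--     document_parts = ["<DOCUMENT>"]
--
--     for section_title, section_content in metadata_sections:
--         document_parts.append(f"<{section_title}>")
--         document_parts.extend(section_content)
--         document_parts.append(f"</{section_title}>")
--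
--     document_parts.append("</DOCUMENT>")
--     return "\n".join(document_parts)
-- ===== SOURCE B (Python) =====
-- def build_document_metadata_string(
--     metadata_sections: list[tuple[str, list[str]]],
-- ) -> str:
--     """Build the document by recursive back-to-front string concatenation:
--     each recursion step prepends one fully rendered newline-terminated section
--     block to the rendering of the rest; no part list and no join are used."""
--
--     def render(sections):
--         if not sections:
--             return "</DOCUMENT>"
--         title, content = sections[0]
--         body = "".join(line + "\n" for line in content)
--         return f"<{title}>\n{body}</{title}>\n" + render(sections[1:])
--
--     return "<DOCUMENT>\n" + render(metadata_sections)
-- ===== Notes on version B (the rewrite author's own statement) =====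
-- stated objective: alternative
-- what changed: Replaces A's flat part-list accumulation plus final '\n'.join with a recursive back-to-front construction: each recursion step concatenates one fully rendered newline-terminated section block onto the rendering of the remaining sections, so no part list and no join exist at all.
import Mathlib
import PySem

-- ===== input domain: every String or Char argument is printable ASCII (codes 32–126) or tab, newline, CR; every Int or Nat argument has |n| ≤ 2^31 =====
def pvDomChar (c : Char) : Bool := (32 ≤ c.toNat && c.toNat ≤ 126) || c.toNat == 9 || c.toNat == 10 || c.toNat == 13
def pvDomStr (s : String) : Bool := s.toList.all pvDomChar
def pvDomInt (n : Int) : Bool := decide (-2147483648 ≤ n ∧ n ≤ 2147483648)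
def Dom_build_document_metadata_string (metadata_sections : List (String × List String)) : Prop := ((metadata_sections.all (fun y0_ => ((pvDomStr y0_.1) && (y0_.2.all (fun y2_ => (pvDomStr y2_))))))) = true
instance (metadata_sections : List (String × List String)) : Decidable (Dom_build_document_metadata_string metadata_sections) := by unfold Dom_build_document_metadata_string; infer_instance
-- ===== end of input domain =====

-- B replaces A's flat part-list accumulation plus final '\n'.join with a recursive
-- back-to-front string construction (no part list, no join); objective: alternative.

-- ===== PORT A =====
-- f"<{t}>" / f"</{t}>": built character-by-character (exact for any string)
def pvOpenTag (t : String) : String := String.ofList ('<' :: t.toList ++ ['>'])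
def pvCloseTag (t : String) : String := String.ofList ('<' :: '/' :: t.toList ++ ['>'])

def build_document_metadata_string (metadata_sections : List (String × List String)) : String :=
  -- document_parts = ["<DOCUMENT>"]; for t, c in …: append open tag, extend content, append close tag
  let document_parts : List String :=
    metadata_sections.foldl
      (fun acc s => ((acc ++ [pvOpenTag s.1]) ++ s.2) ++ [pvCloseTag s.1])
      ["<DOCUMENT>"]
  PySem.Str.join "\n" (document_parts ++ ["</DOCUMENT>"])

-- ===== PORT B =====
-- render(sections): recursion over the section list, concatenating one rendered
-- newline-terminated block (f"<{t}>\n{body}</{t}>\n") onto render(rest);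
-- strings are handled as List Char (exact: Python + on str is list-of-chars append)
def pvRenderB : List (String × List String) → List Char
  | [] => "</DOCUMENT>".toList
  | (t, c) :: rest =>
      -- body = "".join(line + "\n" for line in content)
      ('<' :: t.toList ++ ['>', '\n'])
        ++ c.flatMap (fun line => line.toList ++ ['\n'])
        ++ ('<' :: '/' :: t.toList ++ ['>', '\n'])
        ++ pvRenderB rest

def build_document_metadata_string_alt (metadata_sections : List (String × List String)) : String :=
  String.ofList ("<DOCUMENT>".toList ++ '\n' :: pvRenderB metadata_sections)

-- ===== PRECONDITION & SPEC =====
def Spec_build_document_metadata_string (metadata_sections : List (String × List String)) (out : String) : Prop := out = build_document_metadata_string_alt metadata_sections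
instance (metadata_sections : List (String × List String)) (out : String) : Decidable (Spec_build_document_metadata_string metadata_sections out) := by unfold Spec_build_document_metadata_string; infer_instance

-- ===== CLAIM (what is proved, stated in full; the proofs are below) =====
def Claim_equal_build_document_metadata_string : Prop := ∀ (metadata_sections : List (String × List String)), Dom_build_document_metadata_string metadata_sections → Spec_build_document_metadata_string metadata_sections (build_document_metadata_string metadata_sections)

-- ===== LEMMAS AND PROOFS =====

-- joining a concatenation of two nonempty part-lists splits around one separator
theorem pv_join_append_ne (sep : List Char) (l rest : List (List Char))
    (hl : l ≠ []) (hr : rest ≠ []) :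
    PySem.Chars.join sep (l ++ rest) = PySem.Chars.join sep l ++ sep ++ PySem.Chars.join sep rest := by
  induction l with
  | nil => exact absurd rfl hl
  | cons a l ih =>
    cases l with
    | nil =>
      cases rest with
      | nil => exact absurd rfl hr
      | cons r rs =>
        simp [PySem.Chars.join_cons_cons, PySem.Chars.join_singleton]
    | cons b l' =>
      have h2 := ih (by simp)
      simp only [List.cons_append] at h2 ⊢
      rw [PySem.Chars.join_cons_cons sep a b (l' ++ rest),
          PySem.Chars.join_cons_cons sep a b l', h2]
      simp [List.append_assoc]

-- join over a list with a distinguished last element = newline-terminate all but the last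
theorem pv_join_terminated (sep : List Char) (ls : List (List Char)) (last : List Char) :
    PySem.Chars.join sep (ls ++ [last]) = ls.flatMap (fun l => l ++ sep) ++ last := by
  induction ls with
  | nil => simp [PySem.Chars.join_singleton]
  | cons a ls ih =>
    have h : PySem.Chars.join sep (([a] : List (List Char)) ++ (ls ++ [last]))
        = PySem.Chars.join sep [a] ++ sep ++ PySem.Chars.join sep (ls ++ [last]) :=
      pv_join_append_ne sep [a] (ls ++ [last]) (by simp) (by simp)
    simp only [List.singleton_append] at h
    rw [List.cons_append, h, PySem.Chars.join_singleton, ih]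
    simp [List.append_assoc]

-- A's accumulation loop is a flatMap of the three-part section blocks
theorem pv_foldl_sections (ms : List (String × List String)) (acc : List String) :
    ms.foldl (fun acc s => ((acc ++ [pvOpenTag s.1]) ++ s.2) ++ [pvCloseTag s.1]) acc
      = acc ++ ms.flatMap (fun s => pvOpenTag s.1 :: s.2 ++ [pvCloseTag s.1]) := by
  induction ms generalizing acc with
  | nil => simp
  | cons s ms ih => simp [List.append_assoc, List.flatMap_def]

-- B's recursion equals the newline-terminated flattening of A's section lines
theorem pv_renderB_eq (ms : List (String × List String)) :
    pvRenderB ms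
      = (ms.flatMap (fun s => pvOpenTag s.1 :: s.2 ++ [pvCloseTag s.1])).flatMap
          (fun l => l.toList ++ '\n'.toString.toList) ++ "</DOCUMENT>".toList := by
  induction ms with
  | nil => simp [pvRenderB]
  | cons s ms ih =>
    obtain ⟨t, c⟩ := s
    simp only [pvRenderB, ih, List.flatMap_cons, List.flatMap_append, List.flatMap_cons,
      List.flatMap_nil, pvOpenTag, pvCloseTag, String.toList_ofList]
    simp [List.append_assoc, List.flatMap_def, Char.toString]

theorem pv_ports_eq (ms : List (String × List String)) :
    build_document_metadata_string ms = build_document_metadata_string_alt ms := by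
  unfold build_document_metadata_string build_document_metadata_string_alt
  rw [pv_foldl_sections]
  simp only [PySem.Str.join]
  refine congrArg String.ofList ?_
  have key := pv_join_terminated "\n".toList
      (("<DOCUMENT>".toList) ::
        (ms.flatMap (fun s => pvOpenTag s.1 :: s.2 ++ [pvCloseTag s.1])).map String.toList)
      ("</DOCUMENT>".toList)
  rw [pv_renderB_eq]
  simp only [List.cons_append, List.map_cons] at key ⊢
  simp only [List.nil_append, List.map_append, List.map_cons, List.map_nil]
  rw [key]
  simp [List.flatMap_def, Function.comp_def]

-- ===== VERDICT (by name: the statement is the Claim_ definition above) =====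
theorem build_document_metadata_string_spec : Claim_equal_build_document_metadata_string := by
  intro ms _
  exact pv_ports_eq ms
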